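-- pv_equiv track=rewrite | github.com/BigDog-rgy/Human-Superorganism | combined_viz.py | replace_dataset_lines
-- ===== SOURCE A (Python) =====
-- def replace_dataset_lines(html: str) -> str:
--     lines     = html.splitlines(keepends=True)
--     new_lines = []
--     for line in lines:
--         stripped = line.strip()
--         indent   = line[: len(line) - len(line.lstrip())]
--         if stripped.startswith("nodes = new vis.DataSet("):
--             new_lines.append(indent + "nodes = globalNeuronNodes;\n")
--         elif stripped.startswith("edges = new vis.DataSet("):
--             new_lines.append(indent + "edges = globalNeuronEdges;\n")
--         else:
--             new_lines.append(line)
--     return "".join(new_lines)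
-- ===== SOURCE B (Python) =====
-- # Single forward scan over the string (index two-pointer line splitting) instead of
-- # splitlines(keepends=True) + per-line list building.
-- def replace_dataset_lines(html: str) -> str:
--     out = []
--     i, n = 0, len(html)
--     while i < n:
--         j = i
--         while j < n and html[j] != '\n' and html[j] != '\r':
--             j += 1
--         if j < n and html[j] == '\r' and j + 1 < n and html[j + 1] == '\n':
--             end = j + 2
--         elif j < n:
--             end = j + 1
--         else:
--             end = j
--         body = html[i:j]
--         core = body.strip()
--         repl = None
--         if core.startswith("nodes = new vis.DataSet("):
--             repl = "nodes = globalNeuronNodes;\n"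
--         elif core.startswith("edges = new vis.DataSet("):
--             repl = "edges = globalNeuronEdges;\n"
--         if repl is not None:
--             k = 0
--             while k < len(body) and (body[k] == ' ' or body[k] == '\t'):
--                 k += 1
--             out.append(body[:k] + repl)
--         else:
--             out.append(html[i:end])
--         i = end
--     return "".join(out)
-- ===== Notes on version B (the rewrite author's own statement) =====
-- stated objective: alternative
-- what changed: B replaces A's splitlines(keepends=True) + per-line list building and join with a single forward index scan that locates each line's terminator by two pointers and emits output as it goes, computing the indent by a direct space/tab scan instead of len(line)-len(line.lstrip()).
import Mathlib
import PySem

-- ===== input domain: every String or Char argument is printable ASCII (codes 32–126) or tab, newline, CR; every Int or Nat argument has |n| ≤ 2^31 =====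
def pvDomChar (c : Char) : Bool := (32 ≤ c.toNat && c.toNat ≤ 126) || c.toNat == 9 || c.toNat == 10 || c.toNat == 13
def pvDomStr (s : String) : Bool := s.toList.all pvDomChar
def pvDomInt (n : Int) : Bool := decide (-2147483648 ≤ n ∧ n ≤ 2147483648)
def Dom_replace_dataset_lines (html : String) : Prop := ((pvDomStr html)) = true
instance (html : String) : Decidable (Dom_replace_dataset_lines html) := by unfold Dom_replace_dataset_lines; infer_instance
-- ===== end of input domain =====

-- B replaces A's splitlines(keepends=True)+per-line list with a single forward scan; objective: alternative structure, same cost.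

-- ===== PORT A =====
-- html.splitlines(keepends=True), exact for the line terminators admitted by Dom ('\n', '\r', '\r\n')
def pvSplitKeep (cs : List Char) : List (List Char) :=
  match cs with
  | [] => []
  | '\n' :: rest => ['\n'] :: pvSplitKeep rest
  | '\r' :: '\n' :: rest => ['\r', '\n'] :: pvSplitKeep rest
  | '\r' :: rest => ['\r'] :: pvSplitKeep rest
  | c :: rest =>
    match pvSplitKeep rest with
    | [] => [[c]]
    | l :: ls => (c :: l) :: ls

-- the body of A's for-loop: what gets appended to new_lines for one line
def pvProcA (line : List Char) : List Char :=
  let stripped := PySem.Chars.strip line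
  let indent := line.take (line.length - (PySem.Chars.lstrip line).length)
  if PySem.Chars.startswith stripped ("nodes = new vis.DataSet(".toList) then
    indent ++ ("nodes = globalNeuronNodes;\n".toList)
  else if PySem.Chars.startswith stripped ("edges = new vis.DataSet(".toList) then
    indent ++ ("edges = globalNeuronEdges;\n".toList)
  else line

def replace_dataset_lines (html : String) : String :=
  String.ofList (PySem.Chars.join [] ((pvSplitKeep html.toList).map pvProcA))

-- ===== PORT B =====
def pvNotNL (c : Char) : Bool := c != '\n' && c != '\r'
def pvIndentCh (c : Char) : Bool := c == ' ' || c == '\t'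

-- B's terminator step: from the tail starting at the first '\n'/'\r', the consumed terminator and the rest
def pvSplitTerm : List Char → List Char × List Char
  | '\r' :: '\n' :: r => (['\r', '\n'], r)
  | t :: r => ([t], r)
  | [] => ([], [])

theorem pvSplitTerm_snd_le (r : List Char) : (pvSplitTerm r).2.length ≤ r.length := by
  match r with
  | [] => simp [pvSplitTerm]
  | '\r' :: '\n' :: r' => simp [pvSplitTerm]; omega
  | t :: r' =>
    unfold pvSplitTerm
    split <;> simp_all
    all_goals omega

theorem pvSplitTerm_snd_lt (r : List Char) (h : r ≠ []) : (pvSplitTerm r).2.length < r.length := by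
  match r with
  | [] => exact absurd rfl h
  | '\r' :: '\n' :: r' => simp [pvSplitTerm]
  | t :: r' =>
    unfold pvSplitTerm
    split <;> simp_all

theorem pvGoB_dec (c : Char) (cs' : List Char) :
    (pvSplitTerm (List.dropWhile pvNotNL (c :: cs'))).2.length < (c :: cs').length := by
  by_cases hc : pvNotNL c = true
  · have h1 : List.dropWhile pvNotNL (c :: cs') = List.dropWhile pvNotNL cs' := by
      simp [List.dropWhile, hc]
    rw [h1]
    calc (pvSplitTerm (List.dropWhile pvNotNL cs')).2.length
        ≤ (List.dropWhile pvNotNL cs').length := pvSplitTerm_snd_le _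
      _ ≤ cs'.length := List.length_dropWhile_le _ _
      _ < (c :: cs').length := by simp
  · have h1 : List.dropWhile pvNotNL (c :: cs') = c :: cs' := by
      simp [List.dropWhile, Bool.eq_false_iff.mpr hc]
    rw [h1]
    exact pvSplitTerm_snd_lt _ (by simp)

-- B's while-loop over the string, one line per step
def pvGoB (cs : List Char) : List Char :=
  match cs with
  | [] => []
  | c :: cs' =>
    let body := List.takeWhile pvNotNL (c :: cs')
    let r := List.dropWhile pvNotNL (c :: cs')
    let term := (pvSplitTerm r).1
    let rest := (pvSplitTerm r).2
    let core := PySem.Chars.strip body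
    let repl : Option (List Char) :=
      if PySem.Chars.startswith core ("nodes = new vis.DataSet(".toList) then
        some ("nodes = globalNeuronNodes;\n".toList)
      else if PySem.Chars.startswith core ("edges = new vis.DataSet(".toList) then
        some ("edges = globalNeuronEdges;\n".toList)
      else none
    match repl with
    | some rp => List.takeWhile pvIndentCh body ++ rp ++ pvGoB rest
    | none => body ++ term ++ pvGoB rest
  termination_by cs.length
  decreasing_by exact pvGoB_dec c cs'

def replace_dataset_lines_alt (html : String) : String := String.ofList (pvGoB html.toList)

-- ===== PRECONDITION & SPEC =====
def Spec_replace_dataset_lines (html : String) (out : String) : Prop := out = replace_dataset_lines_alt html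
instance (html : String) (out : String) : Decidable (Spec_replace_dataset_lines html out) := by unfold Spec_replace_dataset_lines; infer_instance

-- ===== CLAIM (what is proved, stated in full; the proofs are below) =====
def Claim_equal_replace_dataset_lines : Prop := ∀ (html : String), Dom_replace_dataset_lines html → Spec_replace_dataset_lines html (replace_dataset_lines html)

-- ===== LEMMAS AND PROOFS =====

theorem pvJoinNilCons (x : List Char) (xs : List (List Char)) :
    PySem.Chars.join [] (x :: xs) = x ++ PySem.Chars.join [] xs := by
  cases xs with
  | nil => simp [PySem.Chars.join, List.intercalate]
  | cons y ys => simp [PySem.Chars.join, List.intercalate]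

-- splitting off the first keepends-line
theorem pvSplitKeep_step (cs : List Char) (h : cs ≠ []) :
    pvSplitKeep cs =
      (List.takeWhile pvNotNL cs ++ (pvSplitTerm (List.dropWhile pvNotNL cs)).1)
        :: pvSplitKeep (pvSplitTerm (List.dropWhile pvNotNL cs)).2 := by
  induction cs with
  | nil => exact absurd rfl h
  | cons c rest ih =>
    by_cases h1 : c = '\n'
    · subst h1
      simp [pvSplitKeep, pvSplitTerm, List.takeWhile, List.dropWhile, pvNotNL]
    · by_cases h2 : c = '\r'
      · subst h2
        cases rest with
        | nil => simp [pvSplitKeep, pvSplitTerm, List.takeWhile, List.dropWhile, pvNotNL]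
        | cons d rest' =>
          by_cases h3 : d = '\n'
          · subst h3
            simp [pvSplitKeep, pvSplitTerm, List.takeWhile, List.dropWhile, pvNotNL]
          · simp [pvSplitKeep, pvSplitTerm, List.takeWhile, List.dropWhile, pvNotNL, h3]
      · have hc : pvNotNL c = true := by simp [pvNotNL, h1, h2]
        have e1 : List.takeWhile pvNotNL (c :: rest) = c :: List.takeWhile pvNotNL rest := by
          simp [List.takeWhile, hc]
        have e2 : List.dropWhile pvNotNL (c :: rest) = List.dropWhile pvNotNL rest := by
          simp [List.dropWhile, hc]
        have e0 : pvSplitKeep (c :: rest) =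
            (match pvSplitKeep rest with
              | [] => [[c]]
              | l :: ls => (c :: l) :: ls) := by
          conv_lhs => unfold pvSplitKeep
          split <;> simp_all
        rw [e0, e1, e2]
        cases hr : rest with
        | nil => simp [pvSplitKeep, pvSplitTerm, List.takeWhile, List.dropWhile]
        | cons d rest' =>
          rw [← hr, ih (by rw [hr]; simp)]
          simp

theorem pvTakeWhileCongr (p q : Char → Bool) (l : List Char) (h : ∀ c ∈ l, p c = q c) :
    List.takeWhile p l = List.takeWhile q l := by
  induction l with
  | nil => rfl
  | cons c cs ih =>
    have hc := h c (by simp)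
    simp only [List.takeWhile]
    rw [← hc]
    cases hp : p c with
    | false => rfl
    | true => rw [ih (fun d hd => h d (by simp [hd]))]

theorem pvRstripAppendWs (x ws : List Char) (h : ∀ c ∈ ws, PySem.Chars.isspace c = true) :
    PySem.Chars.rstrip (x ++ ws) = PySem.Chars.rstrip x := by
  unfold PySem.Chars.rstrip
  rw [List.reverse_append, List.dropWhile_append]
  have hws : List.dropWhile PySem.Chars.isspace ws.reverse = [] := by
    rw [List.dropWhile_eq_nil_iff]
    intro c hc
    exact h c (List.mem_reverse.mp hc)
  simp [hws]

theorem pvStripAppendWs (x ws : List Char) (h : ∀ c ∈ ws, PySem.Chars.isspace c = true) :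
    PySem.Chars.strip (x ++ ws) = PySem.Chars.strip x := by
  unfold PySem.Chars.strip PySem.Chars.lstrip
  rw [List.dropWhile_append]
  cases he : (List.dropWhile PySem.Chars.isspace x).isEmpty with
  | true =>
    have hws : List.dropWhile PySem.Chars.isspace ws = [] := by
      rw [List.dropWhile_eq_nil_iff]; intro c hc; exact h c hc
    simp [hws, List.isEmpty_iff.mp he]
  | false =>
    simp only [Bool.false_eq_true, if_false]
    exact pvRstripAppendWs _ _ h

-- A's indent slice is takeWhile isspace
theorem pvIndentEq (l : List Char) :
    l.take (l.length - (PySem.Chars.lstrip l).length) = List.takeWhile PySem.Chars.isspace l := by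
  unfold PySem.Chars.lstrip
  have hlen : (List.takeWhile PySem.Chars.isspace l).length +
      (List.dropWhile PySem.Chars.isspace l).length = l.length := by
    rw [← List.length_append, List.takeWhile_append_dropWhile]
  have h1 : l.length - (List.dropWhile PySem.Chars.isspace l).length =
      (List.takeWhile PySem.Chars.isspace l).length := by omega
  rw [h1]
  exact (List.prefix_iff_eq_take.mp (List.takeWhile_prefix _)).symm


theorem pvCharClass (c : Char) (hdom : pvDomChar c = true) (hnl : pvNotNL c = true) :
    PySem.Chars.isspace c = pvIndentCh c := by
  have h10 : c.toNat ≠ 10 := by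
    intro h
    have e := Char.ofNat_toNat c
    rw [h] at e
    rw [← e] at hnl
    simp [pvNotNL] at hnl
  have h13 : c.toNat ≠ 13 := by
    intro h
    have e := Char.ofNat_toNat c
    rw [h] at e
    rw [← e] at hnl
    simp [pvNotNL] at hnl
  have hd : (32 ≤ c.toNat ∧ c.toNat ≤ 126) ∨ c.toNat = 9 := by
    simp [pvDomChar] at hdom
    rcases hdom with ((h | h) | h) | h
    · exact Or.inl h
    · exact Or.inr h
    · exact absurd h h10
    · exact absurd h h13
  rw [Bool.eq_iff_iff]
  simp only [PySem.Chars.isspace, pvIndentCh, Bool.or_eq_true, Bool.and_eq_true, decide_eq_true_eq,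
    beq_iff_eq]
  constructor
  · intro h
    have hn : c.toNat = 32 ∨ c.toNat = 9 := by omega
    rcases hn with h | h
    · left; have e := Char.ofNat_toNat c; rw [h] at e; rw [← e]
    · right; have e := Char.ofNat_toNat c; rw [h] at e; rw [← e]
  · rintro (rfl | rfl) <;> simp [Char.toNat]

theorem pvRstripNil : PySem.Chars.rstrip [] = [] := by
  simp [PySem.Chars.rstrip]

theorem pvIndentAgree (body term : List Char)
    (hb : ∀ c ∈ body, pvNotNL c = true) (hd : ∀ c ∈ body, pvDomChar c = true)
    (hne : PySem.Chars.strip body ≠ []) :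
    List.takeWhile PySem.Chars.isspace (body ++ term) = List.takeWhile pvIndentCh body := by
  rw [List.takeWhile_append]
  have hsum : (List.takeWhile PySem.Chars.isspace body).length +
      (List.dropWhile PySem.Chars.isspace body).length = body.length := by
    rw [← List.length_append, List.takeWhile_append_dropWhile]
  have hlt : ¬ (List.takeWhile PySem.Chars.isspace body).length = body.length := by
    intro hlen
    have hdw : List.dropWhile PySem.Chars.isspace body = [] := by
      have : (List.dropWhile PySem.Chars.isspace body).length = 0 := by omega
      exact List.length_eq_zero_iff.mp this
    apply hne
    unfold PySem.Chars.strip PySem.Chars.lstrip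
    rw [hdw, pvRstripNil]
  rw [if_neg hlt]
  exact pvTakeWhileCongr _ _ body (fun c hc => pvCharClass c (hd c hc) (hb c hc))

theorem pvDropWhileHead (p : Char → Bool) :
    ∀ (l : List Char) (t : Char) (r : List Char), List.dropWhile p l = t :: r → p t = false := by
  intro l
  induction l with
  | nil => intro t r h; simp at h
  | cons c cs ih =>
    intro t r h
    rw [List.dropWhile_cons] at h
    by_cases hc : p c = true
    · rw [if_pos hc] at h; exact ih t r h
    · rw [if_neg hc] at h
      cases h
      exact Bool.eq_false_iff.mpr hc

theorem pvSplitTerm_fst_isspace (r : List Char)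
    (h : ∀ t r', r = t :: r' → pvNotNL t = false) :
    ∀ c ∈ (pvSplitTerm r).1, PySem.Chars.isspace c = true := by
  match r with
  | [] => simp [pvSplitTerm]
  | '\r' :: '\n' :: r' => intro c hc; simp [pvSplitTerm] at hc; rcases hc with rfl | rfl <;> decide
  | t :: r' =>
    intro c hc
    have ht : pvNotNL t = false := h t r' rfl
    have : t = '\n' ∨ t = '\r' := by
      simp [pvNotNL] at ht
      by_cases h1 : t = '\n'
      · exact Or.inl h1
      · exact Or.inr (ht h1)
    unfold pvSplitTerm at hc
    split at hc
    · simp at hc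
      rcases hc with rfl | rfl <;> decide
    · rename_i t2 r2 heq
      simp at hc
      subst hc
      injection heq with e1 e2
      subst e1
      rcases this with rfl | rfl <;> decide
    · simp at hc

theorem pvSplitTerm_snd_mem (r : List Char) : ∀ c ∈ (pvSplitTerm r).2, c ∈ r := by
  match r with
  | [] => simp [pvSplitTerm]
  | '\r' :: '\n' :: r' => intro c hc; simp [pvSplitTerm] at hc; simp [hc]
  | t :: r' =>
    intro c hc
    unfold pvSplitTerm at hc
    split at hc <;> simp_all

-- per-line agreement
theorem pvLineEq (body term : List Char)
    (hb : ∀ c ∈ body, pvNotNL c = true)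
    (hd : ∀ c ∈ body, pvDomChar c = true)
    (ht : ∀ c ∈ term, PySem.Chars.isspace c = true) :
    pvProcA (body ++ term) =
      (match (if PySem.Chars.startswith (PySem.Chars.strip body) ("nodes = new vis.DataSet(".toList) then
                some ("nodes = globalNeuronNodes;\n".toList)
              else if PySem.Chars.startswith (PySem.Chars.strip body) ("edges = new vis.DataSet(".toList) then
                some ("edges = globalNeuronEdges;\n".toList)
              else none : Option (List Char)) with
        | some rp => List.takeWhile pvIndentCh body ++ rp
        | none => body ++ term) := by
  unfold pvProcA
  rw [pvIndentEq, pvStripAppendWs body term ht]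
  by_cases hn : PySem.Chars.startswith (PySem.Chars.strip body) ("nodes = new vis.DataSet(".toList) = true
  · rw [if_pos hn, if_pos hn]
    have hne : PySem.Chars.strip body ≠ [] := by
      intro he
      rw [he] at hn
      rw [PySem.Chars.startswith_iff] at hn
      simp at hn
    rw [pvIndentAgree body term hb hd hne]
  · rw [if_neg hn, if_neg hn]
    by_cases hedge : PySem.Chars.startswith (PySem.Chars.strip body) ("edges = new vis.DataSet(".toList) = true
    · rw [if_pos hedge, if_pos hedge]
      have hne : PySem.Chars.strip body ≠ [] := by
        intro he
        rw [he] at hedge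
        rw [PySem.Chars.startswith_iff] at hedge
        simp at hedge
      rw [pvIndentAgree body term hb hd hne]
    · rw [if_neg hedge, if_neg hedge]

theorem pvMain : ∀ (n : Nat) (cs : List Char), cs.length ≤ n → (∀ c ∈ cs, pvDomChar c = true) →
    PySem.Chars.join [] ((pvSplitKeep cs).map pvProcA) = pvGoB cs := by
  intro n
  induction n with
  | zero =>
    intro cs hle _
    have h0 : cs = [] := List.length_eq_zero_iff.mp (Nat.le_zero.mp hle)
    subst h0
    simp [pvSplitKeep, pvGoB, PySem.Chars.join_nil]
  | succ n ih =>
    intro cs hle hdom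
    cases cs with
    | nil => simp [pvSplitKeep, pvGoB, PySem.Chars.join_nil]
    | cons c cs' =>
      have hb : ∀ ch ∈ List.takeWhile pvNotNL (c :: cs'), pvNotNL ch = true :=
        fun ch h => List.mem_takeWhile_imp h
      have hdb : ∀ ch ∈ List.takeWhile pvNotNL (c :: cs'), pvDomChar ch = true :=
        fun ch h => hdom ch ((List.takeWhile_sublist _).subset h)
      have htm : ∀ ch ∈ (pvSplitTerm (List.dropWhile pvNotNL (c :: cs'))).1,
          PySem.Chars.isspace ch = true :=
        pvSplitTerm_fst_isspace _ (fun t r' he => pvDropWhileHead pvNotNL (c :: cs') t r' he)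
      have hrest_dom : ∀ ch ∈ (pvSplitTerm (List.dropWhile pvNotNL (c :: cs'))).2,
          pvDomChar ch = true :=
        fun ch h => hdom ch ((List.dropWhile_sublist _).subset (pvSplitTerm_snd_mem _ ch h))
      have hrest_len : (pvSplitTerm (List.dropWhile pvNotNL (c :: cs'))).2.length ≤ n := by
        have hd := pvGoB_dec c cs'
        simp at hle hd
        omega
      rw [pvSplitKeep_step (c :: cs') (by simp), List.map_cons, pvJoinNilCons,
          ih _ hrest_len hrest_dom, pvLineEq _ _ hb hdb htm]
      conv_rhs => rw [pvGoB]
      split <;> simp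

-- ===== VERDICT (by name: the statement is the Claim_ definition above) =====
theorem replace_dataset_lines_spec : Claim_equal_replace_dataset_lines := by
  intro html hdom
  unfold Spec_replace_dataset_lines replace_dataset_lines replace_dataset_lines_alt
  have h : ∀ c ∈ html.toList, pvDomChar c = true := by
    have := hdom
    unfold Dom_replace_dataset_lines pvDomStr at this
    simpa [List.all_eq_true] using this
  rw [pvMain html.toList.length html.toList le_rfl h]
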